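-- pv_equiv track=rewrite | github.com/SamsonSir/opc-custom-skills | skills/video-content-extractor/scripts/extract_long_image.py | _deduplicate_text
-- ===== SOURCE A (Python) =====
-- OVERLAP = 100  # 切分重叠区域（避免文字被截断）
--
-- def _deduplicate_text(text_parts):
--     """去重合并文本（处理重叠区域）"""
--     if not text_parts:
--         return ''
--
--     # 简单去重：检查相邻部分的末尾和开头是否有重复
--     result = text_parts[0]
--
--     for part in text_parts[1:]:
--         # 找重叠部分
--         overlap_len = min(len(result), len(part), OVERLAP * 2)
--         found = False
--
--         for i in range(overlap_len, 0, -1):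
--             if result[-i:] == part[:i]:
--                 result += part[i:]
--                 found = True
--                 break
--
--         if not found:
--             result += '\n' + part
--
--     return result
-- ===== SOURCE B (Python) =====
-- OVERLAP = 100
--
--
-- def _advance(pat, fail, k, c):
--     """One KMP automaton step: extend the current match k by c, falling back through borders."""
--     while k and c != pat[k]:
--         k = fail[k - 1]
--     if c == pat[k]:
--         k += 1
--     return k
--
--
-- def _overlap(result, part):
--     """Longest i (capped at 200) with result[-i:] == part[:i], via a KMP prefix-function automaton."""
--     w = min(len(result), len(part), 2 * OVERLAP)
--     pat = part[:w]
--     fail = [0] if w else []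
--     k = 0
--     for i in range(1, w):
--         k = _advance(pat, fail, k, pat[i])
--         fail.append(k)
--     k = 0
--     for c in result[len(result) - w:]:
--         k = _advance(pat, fail, k, c)
--     return k
--
--
-- def _deduplicate_text(text_parts):
--     """Merge parts, removing the longest boundary overlap (found by KMP, not slice comparison)."""
--     if not text_parts:
--         return ''
--     result = text_parts[0]
--     for part in text_parts[1:]:
--         i = _overlap(result, part)
--         result += part[i:] if i else '\n' + part
--     return result
-- ===== Notes on version B (the rewrite author's own statement) =====
-- stated objective: alternative
-- what changed: B computes each boundary overlap with a KMP prefix-function automaton (build the failure table of the capped pattern, stream the capped tail through it) instead of A's descending loop of per-length slice comparisons.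
import Mathlib
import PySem

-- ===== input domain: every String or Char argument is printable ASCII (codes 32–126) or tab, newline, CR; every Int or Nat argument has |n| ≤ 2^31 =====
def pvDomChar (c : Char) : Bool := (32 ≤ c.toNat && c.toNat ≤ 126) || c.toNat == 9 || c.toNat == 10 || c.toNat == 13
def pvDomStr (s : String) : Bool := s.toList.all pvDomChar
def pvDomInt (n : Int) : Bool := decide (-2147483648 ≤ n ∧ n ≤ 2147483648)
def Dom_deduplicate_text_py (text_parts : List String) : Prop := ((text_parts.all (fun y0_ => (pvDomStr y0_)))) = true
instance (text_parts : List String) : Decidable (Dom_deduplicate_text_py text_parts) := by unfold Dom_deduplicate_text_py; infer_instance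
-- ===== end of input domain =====

-- B finds each boundary overlap with a KMP prefix-function automaton (failure table + linear scan of
-- the capped tail) instead of A's descending per-length slice comparisons (objective: alternative).

-- ===== PORT A =====
-- inner 'for i in range(overlap_len, 0, -1): if result[-i:] == part[:i]: result += part[i:]; found = True; break'
-- plus the 'if not found: result += "\n" + part' fallthrough (i counts down; 0 = loop exhausted)
def dedupA_find (result part : List Char) : Nat → List Char
  | 0 => result ++ '\n' :: part
  | i + 1 =>
    if PySem.List.slice result (some (-((i + 1 : Nat) : Int))) none =
       PySem.List.slice part none (some ((i + 1 : Nat) : Int)) then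
      result ++ PySem.List.slice part (some ((i + 1 : Nat) : Int)) none
    else
      dedupA_find result part i

def deduplicate_text_py (text_parts : List String) : String :=
  match text_parts with
  | [] => ""
  | p0 :: rest =>
    String.ofList (rest.foldl
      (fun result part =>
        let pl := part.toList
        let overlapLen := min (min result.length pl.length) 200
        dedupA_find result pl overlapLen)
      p0.toList)

-- ===== PORT B =====
-- '_advance': 'while k and c != pat[k]: k = fail[k-1]; if c == pat[k]: k += 1'.
-- The while loop is run with fuel = the initial k (each fallback strictly decreases k on real runs,
-- so the fuel is never exhausted there); indices k, i, k-1 are in range on every real run, so getD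
-- defaults are never consulted.
def kmpAdvance (pat : List Char) (fail : List Nat) (c : Char) : Nat → Nat → Nat
  | 0, k =>
    if k ≠ 0 ∧ c ≠ pat.getD k default then k
    else if c = pat.getD k default then k + 1 else k
  | fuel + 1, k =>
    if k ≠ 0 ∧ c ≠ pat.getD k default then
      kmpAdvance pat fail c fuel (fail.getD (k - 1) 0)
    else if c = pat.getD k default then k + 1 else k

-- 'fail = [0] if w else []; k = 0; for i in range(1, w): k = _advance(pat, fail, k, pat[i]); fail.append(k)'
-- (List.range' 1 (w-1) = Python range(1, w))
def kmpFailTable (pat : List Char) : List Nat :=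
  if pat.length = 0 then []
  else ((List.range' 1 (pat.length - 1)).foldl
    (fun (st : List Nat × Nat) i =>
      let k := kmpAdvance pat st.1 (pat.getD i default) st.2 st.2
      (st.1 ++ [k], k))
    ([0], 0)).1

-- '_overlap': 'w = min(...); pat = part[:w]; <build fail>; k = 0; for c in result[len(result)-w:]: k = _advance(...)'
-- (result[len(result)-w:] is a non-negative in-range slice since w ≤ len(result): ported as drop)
def kmpOverlap (result pl : List Char) : Nat :=
  let w := min (min result.length pl.length) 200
  let pat := pl.take w
  let fail := kmpFailTable pat
  (result.drop (result.length - w)).foldl (fun k c => kmpAdvance pat fail c k k) 0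

def deduplicate_text_py_alt (text_parts : List String) : String :=
  match text_parts with
  | [] => ""
  | p0 :: rest =>
    String.ofList (rest.foldl
      (fun result part =>
        let pl := part.toList
        let i := kmpOverlap result pl
        if i = 0 then result ++ '\n' :: pl else result ++ pl.drop i)
      p0.toList)

-- ===== PRECONDITION & SPEC =====
def Spec_deduplicate_text_py (text_parts : List String) (out : String) : Prop := out = deduplicate_text_py_alt text_parts
instance (text_parts : List String) (out : String) : Decidable (Spec_deduplicate_text_py text_parts out) := by unfold Spec_deduplicate_text_py; infer_instance

-- ===== CLAIM (what is proved, stated in full; the proofs are below) =====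
def Claim_equal_deduplicate_text_py : Prop := ∀ (text_parts : List String), Dom_deduplicate_text_py text_parts → Spec_deduplicate_text_py text_parts (deduplicate_text_py text_parts)

-- ===== LEMMAS AND PROOFS =====

-- kmpM pat t: the longest j ≤ |pat| such that pat.take j is a suffix of t (the automaton's exact state)
def kmpM (pat t : List Char) : Nat :=
  Nat.findGreatest (fun j => pat.take j <:+ t) pat.length

-- kmpPB pat j (1 ≤ j ≤ |pat|): the longest proper border of pat.take j
def kmpPB (pat : List Char) (j : Nat) : Nat :=
  kmpM pat ((pat.drop 1).take (j - 1))

lemma suffix_of_suffix_le {t s₁ s₂ : List Char} (h₁ : s₁ <:+ t) (h₂ : s₂ <:+ t)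
    (h : s₁.length ≤ s₂.length) : s₁ <:+ s₂ := by
  have h2t := h₂.length_le
  rw [List.suffix_iff_eq_drop] at h₁ h₂ ⊢
  calc s₁ = t.drop (t.length - s₁.length) := h₁
    _ = (t.drop (t.length - s₂.length)).drop (s₂.length - s₁.length) := by
        rw [List.drop_drop]; congr 1; omega
    _ = s₂.drop (s₂.length - s₁.length) := by rw [← h₂]

lemma suffix_drop_of_lt {s' s : List Char} (h : s' <:+ s) (hl : s'.length < s.length) :
    s' <:+ s.drop 1 := by
  rw [List.suffix_iff_eq_drop] at h ⊢
  calc s' = s.drop (s.length - s'.length) := h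
    _ = (s.drop 1).drop (s.length - 1 - s'.length) := by rw [List.drop_drop]; congr 1; omega
    _ = (s.drop 1).drop ((s.drop 1).length - s'.length) := by rw [List.length_drop]

lemma kmpM_suffix (pat t : List Char) : pat.take (kmpM pat t) <:+ t :=
  Nat.findGreatest_spec (P := fun j => pat.take j <:+ t) (Nat.zero_le _)
    (by simp [List.nil_suffix])

lemma kmpM_le_bound (pat t : List Char) : kmpM pat t ≤ pat.length :=
  Nat.findGreatest_le _

lemma le_kmpM (pat t : List Char) {b : Nat} (hb : b ≤ pat.length)
    (h : pat.take b <:+ t) : b ≤ kmpM pat t :=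
  Nat.le_findGreatest hb h

lemma kmpM_le_length (pat t : List Char) : kmpM pat t ≤ t.length := by
  have h := (kmpM_suffix pat t).length_le
  rw [List.length_take] at h
  have := kmpM_le_bound pat t
  omega

lemma kmpM_nil (pat : List Char) : kmpM pat [] = 0 := by
  have := kmpM_le_length pat []
  simpa using this

-- a positive value of kmpM on a snoc text comes from a match on t extended by c
lemma kmpM_snoc_pos (pat t : List Char) (c : Char) {m : Nat} (hm : m = kmpM pat (t ++ [c]))
    (hpos : 0 < m) : pat.take (m - 1) <:+ t ∧ pat.getD (m - 1) default = c := by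
  have hmb : m ≤ pat.length := hm ▸ kmpM_le_bound pat (t ++ [c])
  have hsfx : pat.take m <:+ t ++ [c] := hm ▸ kmpM_suffix pat (t ++ [c])
  obtain ⟨m', rfl⟩ : ∃ m', m = m' + 1 := ⟨m - 1, by omega⟩
  have hlt : m' < pat.length := by omega
  have hsucc : pat.take (m' + 1) = pat.take m' ++ [pat[m']] := by
    rw [List.take_add_one, List.getElem?_eq_getElem hlt]
    rfl
  rw [hsucc] at hsfx
  simp only [Nat.add_sub_cancel]
  obtain ⟨u, hu⟩ := hsfx
  rw [← List.append_assoc] at hu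
  obtain ⟨h1, h2⟩ := List.append_inj' hu (by simp)
  refine ⟨⟨u, h1⟩, ?_⟩
  rw [List.getD_eq_getElem pat default hlt]
  simpa using h2

-- the while-loop of _advance descends the border chain and lands at kmpM pat (t ++ [c])
lemma kmpAdvance_correct (pat t : List Char) (fail : List Nat) (c : Char) :
    ∀ fuel k', k' ≤ fuel →
      pat.take k' <:+ t →
      kmpM pat (t ++ [c]) ≤ k' + 1 →
      k' < pat.length →
      (∀ j, 1 ≤ j → j ≤ k' → fail.getD (j - 1) 0 = kmpPB pat j) →
      kmpAdvance pat fail c fuel k' = kmpM pat (t ++ [c]) := by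
  intro fuel
  induction fuel with
  | zero =>
    intro k' hk0 hsfx hub hw _
    interval_cases k'
    rw [kmpAdvance]
    simp only [ne_eq, not_true_eq_false, false_and, if_false]
    by_cases hc : c = pat.getD 0 default
    · rw [if_pos hc]
      -- m = 1: pat.take 1 = [pat[0]] = [c] is a suffix of t ++ [c]
      have h1 : pat.take 1 <:+ t ++ [c] := by
        have : pat.take 1 = [c] := by
          rw [show (1 : Nat) = 0 + 1 from rfl, List.take_add_one, List.take_zero,
            List.getElem?_eq_getElem hw, hc, List.getD_eq_getElem pat default hw]
          rfl
        rw [this]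
        exact ⟨t, rfl⟩
      have := le_kmpM pat (t ++ [c]) (by omega) h1
      omega
    · rw [if_neg hc]
      -- m = 0: a positive m would force pat[0] = c
      by_contra hne
      have hpos : 0 < kmpM pat (t ++ [c]) := Nat.pos_of_ne_zero (fun h => hne h.symm)
      obtain ⟨_, hch⟩ := kmpM_snoc_pos pat t c rfl hpos
      have : kmpM pat (t ++ [c]) - 1 = 0 := by omega
      rw [this] at hch
      exact hc hch.symm
  | succ fuel ih =>
    intro k' hkf hsfx hub hw hfail
    rw [kmpAdvance]
    by_cases hcond : k' ≠ 0 ∧ c ≠ pat.getD k' default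
    · rw [if_pos hcond]
      obtain ⟨hk0, hc⟩ := hcond
      have hk1 : 1 ≤ k' := Nat.one_le_iff_ne_zero.mpr hk0
      rw [hfail k' hk1 le_rfl]
      -- the fallback value k'' = kmpPB pat k'
      set k'' := kmpPB pat k' with hk''
      have hkpb : k'' = kmpM pat ((pat.drop 1).take (k' - 1)) := rfl
      have htk : (pat.take k').length = k' := by simp; omega
      have hdt : (pat.take k').drop 1 = (pat.drop 1).take (k' - 1) := List.drop_take
      -- k'' ≤ k' - 1
      have hk''le : k'' ≤ k' - 1 := by
        have h := kmpM_le_length pat ((pat.drop 1).take (k' - 1))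
        simp only [List.length_take, List.length_drop] at h
        omega
      -- pat.take k'' is a suffix of t
      have hsfx'' : pat.take k'' <:+ t := by
        have h1 : pat.take k'' <:+ (pat.drop 1).take (k' - 1) := kmpM_suffix _ _
        rw [← hdt] at h1
        exact (h1.trans (List.drop_suffix 1 _)).trans hsfx
      -- maximality: kmpM pat (t ++ [c]) ≤ k'' + 1
      have hub'' : kmpM pat (t ++ [c]) ≤ k'' + 1 := by
        set m := kmpM pat (t ++ [c]) with hm
        rcases Nat.eq_zero_or_pos m with h0 | hpos
        · omega
        obtain ⟨hbs, hbc⟩ := kmpM_snoc_pos pat t c rfl hpos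
        have hmb : m ≤ pat.length := kmpM_le_bound pat (t ++ [c])
        -- m - 1 ≠ k' because pat[k'] ≠ c
        have hne : m - 1 ≠ k' := by
          intro h
          rw [h] at hbc
          exact hc hbc.symm
        have hblt : m - 1 < k' := by omega
        -- pat.take (m-1) is a border of pat.take k', hence ≤ kmpPB pat k'
        have h1 : pat.take (m - 1) <:+ pat.take k' :=
          suffix_of_suffix_le hbs hsfx (by simp; omega)
        have h2 : pat.take (m - 1) <:+ (pat.drop 1).take (k' - 1) := by
          rw [← hdt]
          exact suffix_drop_of_lt h1 (by simp; omega)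
        have h3 := le_kmpM pat ((pat.drop 1).take (k' - 1)) (by omega) h2
        omega
      exact ih _ (by omega) hsfx'' hub'' (by omega)
        (fun j h1 h2 => hfail j h1 (by omega))
    · rw [if_neg hcond]
      by_cases hc : c = pat.getD k' default
      · rw [if_pos hc]
        -- extend: pat.take (k'+1) <:+ t ++ [c]
        have hsucc : pat.take (k' + 1) = pat.take k' ++ [c] := by
          rw [List.take_add_one, List.getElem?_eq_getElem hw, hc,
            List.getD_eq_getElem pat default hw]
          rfl
        have h1 : pat.take (k' + 1) <:+ t ++ [c] := by
          obtain ⟨u, hu⟩ := hsfx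
          exact ⟨u, by rw [hsucc, ← List.append_assoc, hu]⟩
        have := le_kmpM pat (t ++ [c]) (by omega) h1
        omega
      · rw [if_neg hc]
        -- then k' = 0 and c ≠ pat[0]: the answer is 0
        have hk0 : k' = 0 := by
          by_contra h
          exact hcond ⟨h, fun h' => hc h'⟩
        subst hk0
        by_contra hne
        have hpos : 0 < kmpM pat (t ++ [c]) := Nat.pos_of_ne_zero (fun h => hne h.symm)
        obtain ⟨_, hch⟩ := kmpM_snoc_pos pat t c rfl hpos
        have hle := kmpM_snoc_pos pat t c rfl hpos
        have : kmpM pat (t ++ [c]) - 1 = 0 := by omega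
        rw [this] at hch
        exact hc hch.symm

-- one full _advance call from the automaton state kmpM pat t
lemma kmpAdvance_start (pat t : List Char) (fail : List Nat) (c : Char)
    (ht : t.length < pat.length)
    (hfail : ∀ j, 1 ≤ j → j ≤ kmpM pat t → fail.getD (j - 1) 0 = kmpPB pat j) :
    kmpAdvance pat fail c (kmpM pat t) (kmpM pat t) = kmpM pat (t ++ [c]) := by
  have hkl := kmpM_le_length pat t
  apply kmpAdvance_correct pat t fail c _ _ le_rfl (kmpM_suffix pat t) _ (by omega) hfail
  -- maximality at the start: kmpM pat (t ++ [c]) ≤ kmpM pat t + 1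
  set m := kmpM pat (t ++ [c]) with hm
  rcases Nat.eq_zero_or_pos m with h0 | hpos
  · omega
  obtain ⟨hbs, _⟩ := kmpM_snoc_pos pat t c rfl hpos
  have hmb : m ≤ pat.length := kmpM_le_bound pat (t ++ [c])
  have := le_kmpM pat t (by omega) hbs
  omega

-- running the automaton over a text, one prefix at a time
lemma kmpRun_correct (pat : List Char) (fail : List Nat)
    (hfail : ∀ j, 1 ≤ j → j ≤ pat.length → fail.getD (j - 1) 0 = kmpPB pat j) :
    ∀ (text pre : List Char), pre.length + text.length ≤ pat.length →
      text.foldl (fun k c => kmpAdvance pat fail c k k) (kmpM pat pre) =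
        kmpM pat (pre ++ text) := by
  intro text
  induction text with
  | nil => intro pre _; simp
  | cons c cs ih =>
    intro pre hlen
    simp only [List.foldl_cons]
    have ht : pre.length < pat.length := by simp at hlen; omega
    rw [kmpAdvance_start pat pre fail c ht
      (fun j h1 h2 => hfail j h1 (by have := kmpM_le_length pat pre; omega))]
    have := ih (pre ++ [c]) (by simp at hlen ⊢; omega)
    rw [this, List.append_assoc]
    rfl

-- the failure-table build loop: invariant after the first n steps
lemma kmpFailTable_inv (pat : List Char) (_hp : pat.length ≠ 0) :
    ∀ n, n ≤ pat.length - 1 →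
      (((List.range' 1 n).foldl
        (fun (st : List Nat × Nat) i =>
          let k := kmpAdvance pat st.1 (pat.getD i default) st.2 st.2
          (st.1 ++ [k], k))
        ([0], 0)).1.length = n + 1 ∧
       ((List.range' 1 n).foldl
        (fun (st : List Nat × Nat) i =>
          let k := kmpAdvance pat st.1 (pat.getD i default) st.2 st.2
          (st.1 ++ [k], k))
        ([0], 0)).2 = kmpM pat ((pat.drop 1).take n) ∧
       ∀ j, j ≤ n →
        (((List.range' 1 n).foldl
          (fun (st : List Nat × Nat) i =>
            let k := kmpAdvance pat st.1 (pat.getD i default) st.2 st.2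
            (st.1 ++ [k], k))
          ([0], 0)).1.getD j 0 = kmpM pat ((pat.drop 1).take j))) := by
  intro n
  induction n with
  | zero =>
    intro _
    refine ⟨rfl, by simp [kmpM_nil], ?_⟩
    intro j hj
    interval_cases j
    simp [kmpM_nil]
  | succ n ih =>
    intro hn
    obtain ⟨hlen, hst2, hget⟩ := ih (by omega)
    rw [List.range'_1_concat, List.foldl_append]
    set st := ((List.range' 1 n).foldl
      (fun (st : List Nat × Nat) i =>
        let k := kmpAdvance pat st.1 (pat.getD i default) st.2 st.2
        (st.1 ++ [k], k))
      ([0], 0)) with hstdef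
    simp only [List.foldl_cons, List.foldl_nil]
    have hn1 : n + 1 < pat.length := by omega
    -- the processed text so far and its extension
    set t := (pat.drop 1).take n with htdef
    have htlen : t.length = n := by
      rw [htdef]
      simp only [List.length_take, List.length_drop]
      omega
    have hstep : kmpAdvance pat st.1 (pat.getD (1 + n) default) st.2 st.2 =
        kmpM pat ((pat.drop 1).take (n + 1)) := by
      have hidx : (1 + n) = n + 1 := by omega
      have hdl : n < (pat.drop 1).length := by
        simp only [List.length_drop]
        omega
      have hc : pat.getD (1 + n) default = (pat.drop 1)[n]'hdl := by
        rw [List.getElem_drop]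
        exact List.getD_eq_getElem pat default (by omega)
      have hext : (pat.drop 1).take (n + 1) = t ++ [pat.getD (1 + n) default] := by
        rw [htdef, List.take_add_one, List.getElem?_eq_getElem hdl, hc]
        rfl
      rw [hext, hst2]
      apply kmpAdvance_start pat t st.1 _ (by omega)
      intro j h1 h2
      have hml := kmpM_le_length pat t
      have hj : j - 1 ≤ n := by omega
      rw [hget (j - 1) hj]
      rfl
    refine ⟨by simp [hlen], hstep, ?_⟩
    intro j hj
    rcases Nat.lt_or_ge j (n + 1) with hlt | hge
    · rw [List.getD_append _ _ _ _ (by omega)]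
      exact hget j (by omega)
    · have hj1 : j = n + 1 := by omega
      subst hj1
      rw [← hstep, ← hlen]
      simp [List.getD_eq_getElem?_getD]

-- the failure table is correct
lemma kmpFailTable_correct (pat : List Char) :
    ∀ j, 1 ≤ j → j ≤ pat.length →
      (kmpFailTable pat).getD (j - 1) 0 = kmpPB pat j := by
  intro j h1 h2
  have hp : pat.length ≠ 0 := by omega
  unfold kmpFailTable
  rw [if_neg hp]
  obtain ⟨_, _, hget⟩ := kmpFailTable_inv pat hp (pat.length - 1) le_rfl
  rw [hget (j - 1) (by omega)]
  rfl

lemma findGreatest_congr (P Q : Nat → Prop) [DecidablePred P] [DecidablePred Q] :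
    ∀ n, (∀ i, i ≤ n → (P i ↔ Q i)) →
      Nat.findGreatest P n = Nat.findGreatest Q n := by
  intro n
  induction n with
  | zero => intro _; rfl
  | succ n ih =>
    intro h
    rw [Nat.findGreatest_succ, Nat.findGreatest_succ]
    by_cases hp : P (n + 1)
    · rw [if_pos hp, if_pos ((h (n + 1) le_rfl).mp hp)]
    · rw [if_neg hp, if_neg (fun hq => hp ((h (n + 1) le_rfl).mpr hq))]
      exact ih (fun i hi => h i (by omega))

-- B's overlap is the greatest matching boundary length
lemma kmpOverlap_eq (result pl : List Char) :
    kmpOverlap result pl =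
      Nat.findGreatest (fun i => result.drop (result.length - i) = pl.take i)
        (min (min result.length pl.length) 200) := by
  unfold kmpOverlap
  set w := min (min result.length pl.length) 200 with hw
  have hwr : w ≤ result.length := by omega
  have hwp : w ≤ pl.length := by omega
  set pat := pl.take w with hpat
  have hpatlen : pat.length = w := by simp [hpat]; omega
  set tail := result.drop (result.length - w) with htail
  have htlen : tail.length = w := by simp [htail]; omega
  have hrun := kmpRun_correct pat (kmpFailTable pat) (kmpFailTable_correct pat)
    tail [] (by simp [htlen, hpatlen])
  rw [kmpM_nil] at hrun
  simp only [List.nil_append] at hrun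
  rw [hrun]
  unfold kmpM
  rw [hpatlen]
  apply findGreatest_congr
  intro i hi
  have htake : pat.take i = pl.take i := by
    rw [hpat, List.take_take, min_eq_left hi]
  have hlen : (pl.take i).length = i := by simp; omega
  rw [htake, List.suffix_iff_eq_drop, hlen, htlen]
  have harith : result.length - w + (w - i) = result.length - i := by omega
  constructor
  · intro h
    rw [List.drop_drop, harith] at h
    exact h.symm
  · intro h
    rw [List.drop_drop, harith]
    exact h.symm

-- A's descending loop is the greatest matching boundary length
lemma dedupA_find_eq (result pl : List Char) (n : Nat) :
    dedupA_find result pl n =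
      (let m := Nat.findGreatest (fun i => result.drop (result.length - i) = pl.take i) n
       if m = 0 then result ++ '\n' :: pl else result ++ pl.drop m) := by
  induction n with
  | zero => rfl
  | succ n ih =>
    rw [dedupA_find]
    have hs : PySem.List.slice result (some (-((n + 1 : Nat) : Int))) none =
        result.drop (result.length - (n + 1)) :=
      PySem.List.slice_from_neg_natCast result (n + 1) (Nat.succ_pos n)
    have ht : PySem.List.slice pl none (some ((n + 1 : Nat) : Int)) = pl.take (n + 1) :=
      PySem.List.slice_to_natCast pl (n + 1)
    have hd : PySem.List.slice pl (some ((n + 1 : Nat) : Int)) none = pl.drop (n + 1) :=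
      PySem.List.slice_from_natCast pl (n + 1)
    rw [hs, ht, hd]
    simp only [Nat.findGreatest_succ]
    by_cases h : result.drop (result.length - (n + 1)) = pl.take (n + 1)
    · rw [if_pos h, if_pos h, if_neg (by omega)]
    · rw [if_neg h, if_neg h, ih]

-- ===== VERDICT (by name: the statement is the Claim_ definition above) =====
theorem deduplicate_text_py_spec : Claim_equal_deduplicate_text_py := by
  intro text_parts _
  unfold Spec_deduplicate_text_py deduplicate_text_py deduplicate_text_py_alt
  have hstep : (fun (result : List Char) (part : String) =>
        let pl := part.toList
        let overlapLen := min (min result.length pl.length) 200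
        dedupA_find result pl overlapLen) =
      (fun (result : List Char) (part : String) =>
        let pl := part.toList
        let i := kmpOverlap result pl
        if i = 0 then result ++ '\n' :: pl else result ++ pl.drop i) := by
    funext result part
    simp only [dedupA_find_eq, kmpOverlap_eq]
  match text_parts with
  | [] => rfl
  | p0 :: rest => simp only [hstep]
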